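-- pv_equiv track=rewrite | github.com/435THz/PMDODump | Scripts/itemGen.py | _get_family_diff
-- ===== SOURCE A (Python) =====
-- def _get_family_diff(f1, f2):
--
--     has_diff = False
--     name_diff = []
--
--     for ii in range(max(len(f1), len(f2))):
--         if ii < len(f1) and ii < len(f2):
--             if f1[ii] != f2[ii]:
--                 has_diff = True
--             name_diff.append((f1[ii], f2[ii]))
--         elif ii < len(f1):
--             has_diff = True
--             name_diff.append((f1[ii], ""))
--         else:
--             has_diff = True
--             name_diff.append(("", f2[ii]))
--
--     if has_diff:
--         return name_diff
--     return None
-- ===== SOURCE B (Python) =====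
-- def _get_family_diff(f1, f2):
--     if len(f1) == len(f2) and all(a == b for a, b in zip(f1, f2)):
--         return None
--     n = max(len(f1), len(f2))
--     p1 = list(f1) + [""] * (n - len(f1))
--     p2 = list(f2) + [""] * (n - len(f2))
--     return list(zip(p1, p2))
-- ===== Notes on version B (the rewrite author's own statement) =====
-- stated objective: simpler
-- what changed: Replaces the index loop with three branches and a mutable has_diff flag by a separate equality test (length check plus zip over the common prefix) and a one-shot zip of the two lists padded with "" to equal length.
import Mathlib
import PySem

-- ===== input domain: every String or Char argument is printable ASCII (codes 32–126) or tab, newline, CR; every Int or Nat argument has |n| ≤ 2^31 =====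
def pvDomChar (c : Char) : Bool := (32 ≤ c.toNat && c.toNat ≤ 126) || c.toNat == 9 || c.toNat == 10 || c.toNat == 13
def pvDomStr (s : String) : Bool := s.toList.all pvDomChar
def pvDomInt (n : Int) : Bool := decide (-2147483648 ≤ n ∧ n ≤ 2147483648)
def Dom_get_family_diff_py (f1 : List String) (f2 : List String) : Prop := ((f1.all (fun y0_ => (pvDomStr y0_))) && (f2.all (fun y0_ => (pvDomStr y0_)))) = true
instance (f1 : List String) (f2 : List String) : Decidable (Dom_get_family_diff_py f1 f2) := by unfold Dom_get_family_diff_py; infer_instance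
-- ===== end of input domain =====

-- B replaces A's three-branch index loop with a mutable flag by a separate equality test
-- (length check + zip over the common prefix) and a one-shot zip of the ""-padded lists (objective: simpler).

-- ===== PORT A =====
-- the loop body of A, over state (has_diff, name_diff)
def pvStepA (f1 : List String) (f2 : List String)
    (st : Bool × List (String × String)) (ii : Nat) : Bool × List (String × String) :=
  if ii < f1.length ∧ ii < f2.length then
    ((if f1.getD ii "" ≠ f2.getD ii "" then true else st.1),
     st.2 ++ [(f1.getD ii "", f2.getD ii "")])
  else if ii < f1.length then
    (true, st.2 ++ [(f1.getD ii "", "")])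
  else
    (true, st.2 ++ [("", f2.getD ii "")])

def get_family_diff_py (f1 : List String) (f2 : List String) : Option (List (String × String)) :=
  let st := (List.range (max f1.length f2.length)).foldl (pvStepA f1 f2) (false, [])
  if st.1 then some st.2 else none

-- ===== PORT B =====
def get_family_diff_py_alt (f1 : List String) (f2 : List String) : Option (List (String × String)) :=
  if f1.length = f2.length ∧ (f1.zip f2).all (fun p => p.1 == p.2) then none
  else
    let n := max f1.length f2.length
    let p1 := f1 ++ List.replicate (n - f1.length) ""
    let p2 := f2 ++ List.replicate (n - f2.length) ""
    some (p1.zip p2)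

-- ===== PRECONDITION & SPEC =====
def Spec_get_family_diff_py (f1 : List String) (f2 : List String) (out : Option (List (String × String))) : Prop := out = get_family_diff_py_alt f1 f2
instance (f1 : List String) (f2 : List String) (out : Option (List (String × String))) : Decidable (Spec_get_family_diff_py f1 f2 out) := by unfold Spec_get_family_diff_py; infer_instance

-- ===== CLAIM (what is proved, stated in full; the proofs are below) =====
def Claim_equal_get_family_diff_py : Prop := ∀ (f1 : List String) (f2 : List String), Dom_get_family_diff_py f1 f2 → Spec_get_family_diff_py f1 f2 (get_family_diff_py f1 f2)

-- ===== LEMMAS AND PROOFS =====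

-- closed form of A's fold after n iterations
theorem pvFoldA (f1 f2 : List String) (n : Nat) :
    (List.range n).foldl (pvStepA f1 f2) (false, []) =
      (decide (∃ i, i < n ∧ ¬(i < f1.length ∧ i < f2.length ∧ f1.getD i "" = f2.getD i "")),
       (List.range n).map (fun i => (f1.getD i "", f2.getD i ""))) := by
  induction n with
  | zero => simp
  | succ n ih =>
    rw [List.range_succ, List.foldl_append, ih, List.map_append]
    simp only [List.foldl_cons, List.foldl_nil, pvStepA, List.map_cons, List.map_nil]
    by_cases h1 : n < f1.length ∧ n < f2.length
    · rw [if_pos h1]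
      by_cases h2 : f1.getD n "" = f2.getD n ""
      · rw [if_neg (by simpa using h2)]
        simp only [Prod.mk.injEq]
        refine ⟨?_, trivial⟩
        simp only [decide_eq_decide]
        constructor
        · rintro ⟨i, hi, hP⟩; exact ⟨i, Nat.lt_succ_of_lt hi, hP⟩
        · rintro ⟨i, hi, hP⟩
          refine ⟨i, ?_, hP⟩
          rcases Nat.lt_succ_iff_lt_or_eq.mp hi with h | h
          · exact h
          · exact absurd ⟨h1.1, h1.2, h2⟩ (h ▸ hP)
      · rw [if_pos (by simpa using h2)]
        simp only [Prod.mk.injEq]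
        refine ⟨?_, trivial⟩
        have hex : (∃ i, i < n + 1 ∧ ¬(i < f1.length ∧ i < f2.length ∧ f1.getD i "" = f2.getD i "")) :=
          ⟨n, Nat.lt_succ_self n, fun hc => h2 hc.2.2⟩
        exact (decide_eq_true hex).symm
    · rw [if_neg h1]
      have hP : ¬(n < f1.length ∧ n < f2.length ∧ f1.getD n "" = f2.getD n "") := by
        intro hc; exact h1 ⟨hc.1, hc.2.1⟩
      have hfst : decide (∃ i, i < n + 1 ∧ ¬(i < f1.length ∧ i < f2.length ∧ f1.getD i "" = f2.getD i "")) = true := by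
        simp only [decide_eq_true_eq]
        exact ⟨n, Nat.lt_succ_self n, hP⟩
      rw [hfst]
      by_cases hl : n < f1.length
      · rw [if_pos hl]
        have h2 : f2.getD n "" = "" := by
          have h : f2.length ≤ n := by omega
          simp [List.getD_eq_getElem?_getD, List.getElem?_eq_none h]
        rw [h2]
      · rw [if_neg hl]
        have h2 : f1.getD n "" = "" := by
          have h : f1.length ≤ n := by omega
          simp [List.getD_eq_getElem?_getD, List.getElem?_eq_none h]
        rw [h2]

-- A's accumulated list equals B's zip of padded lists
theorem pvListEq (f1 f2 : List String) :
    (List.range (max f1.length f2.length)).map (fun i => (f1.getD i "", f2.getD i "")) =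
      (f1 ++ List.replicate (max f1.length f2.length - f1.length) "").zip
        (f2 ++ List.replicate (max f1.length f2.length - f2.length) "") := by
  have pad : ∀ (f : List String) (i : Nat) (hfm : f.length ≤ max f1.length f2.length)
      (hi : i < max f1.length f2.length),
      (f ++ List.replicate (max f1.length f2.length - f.length) "")[i]'(by simp; omega)
        = f.getD i "" := by
    intro f i hfm hi
    by_cases hf : i < f.length
    · rw [List.getElem_append_left hf, List.getD_eq_getElem _ _ hf]
    · rw [List.getElem_append_right (by omega)]
      simp [List.getD_eq_getElem?_getD, List.getElem?_eq_none (by omega : f.length ≤ i)]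
  apply List.ext_getElem
  · simp only [List.length_map, List.length_range, List.length_zip, List.length_append,
      List.length_replicate]
    omega
  · intro i h1 h2
    have hi : i < max f1.length f2.length := by simpa using h1
    rw [List.getElem_map, List.getElem_zip]
    simp only [List.getElem_range]
    rw [pad f1 i (by omega) hi, pad f2 i (by omega) hi]

-- B's "all equal" test, as a statement about indices
theorem pvAllEq (f1 f2 : List String) :
    ((f1.zip f2).all (fun p => p.1 == p.2) = true) ↔
      ∀ i, i < f1.length → i < f2.length → f1.getD i "" = f2.getD i "" := by
  rw [List.all_eq_true]
  constructor
  · intro h i hi1 hi2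
    have := h ((f1.zip f2)[i]'(by simp; omega)) (List.getElem_mem _)
    rw [List.getElem_zip] at this
    simp only [beq_iff_eq] at this
    rw [List.getD_eq_getElem _ _ hi1, List.getD_eq_getElem _ _ hi2]
    exact this
  · intro h p hp
    obtain ⟨i, hi, hpe⟩ := List.mem_iff_getElem.mp hp
    rw [List.getElem_zip] at hpe
    have hi1 : i < f1.length := by simp at hi; omega
    have hi2 : i < f2.length := by simp at hi; omega
    subst hpe
    simp only [beq_iff_eq]
    rw [← List.getD_eq_getElem f1 "" hi1, ← List.getD_eq_getElem f2 "" hi2]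
    exact h i hi1 hi2

-- ===== VERDICT (by name: the statement is the Claim_ definition above) =====
theorem get_family_diff_py_spec : Claim_equal_get_family_diff_py := by
  intro f1 f2 _
  unfold Spec_get_family_diff_py get_family_diff_py get_family_diff_py_alt
  rw [pvFoldA]
  by_cases hB : f1.length = f2.length ∧ (f1.zip f2).all (fun p => p.1 == p.2) = true
  · have hnone : ¬(∃ i, i < max f1.length f2.length ∧
        ¬(i < f1.length ∧ i < f2.length ∧ f1.getD i "" = f2.getD i "")) := by
      rintro ⟨i, hi, hP⟩
      have hi1 : i < f1.length := by omega
      have hi2 : i < f2.length := by omega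
      exact hP ⟨hi1, hi2, (pvAllEq f1 f2).mp hB.2 i hi1 hi2⟩
    simp only [hnone, decide_false, if_false, if_pos hB, Bool.false_eq_true, ite_false]
  · have hsome : ∃ i, i < max f1.length f2.length ∧
        ¬(i < f1.length ∧ i < f2.length ∧ f1.getD i "" = f2.getD i "") := by
      by_cases hl : f1.length = f2.length
      · have hz : ¬((f1.zip f2).all (fun p => p.1 == p.2) = true) := fun hc => hB ⟨hl, hc⟩
        rw [pvAllEq] at hz
        push_neg at hz
        obtain ⟨i, hi1, hi2, hne⟩ := hz
        exact ⟨i, by omega, fun hc => hne hc.2.2⟩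
      · rcases Nat.lt_or_ge f1.length f2.length with h | h
        · exact ⟨f1.length, by omega, fun hc => by omega⟩
        · exact ⟨f2.length, by omega, fun hc => by omega⟩
    simp only [hsome, decide_true, if_true, if_neg hB]
    rw [pvListEq]
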